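-- pv_equiv track=rewrite | github.com/cloud-VG/leetcode-python | Problems/frog_jump.py | solution
-- ===== SOURCE A (Python) =====
-- def solution(stones: list[int]) -> bool:
--     for i in range(3, len(stones)):
--         if stones[i] > stones[i - 1] * 2:
--             return False
--
--     stones_set = set(stones)
--
--     reachable_stones = [(0, 0)]
--     last_stone = stones[-1]
--
--     while reachable_stones:
--         stone, dist = reachable_stones.pop()
--
--         for jump in [dist - 1, dist, dist + 1]:
--             if jump <= 0:
--                 continue
--
--             next_stone = stone + jump
--
--             if next_stone == last_stone:
--                 return True
--
--             elif next_stone in stones_set: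
--                 reachable_stones.append((next_stone, jump))
--
--     return False
-- ===== SOURCE B (Python) =====
-- def solution(stones: list[int]) -> bool:
--     if any(stones[i] > stones[i - 1] * 2 for i in range(3, len(stones))):
--         return False
--
--     sset = set(stones)
--     last = stones[-1]
--
--     # Saturate the set of reachable (stone, jump) states; every jump lands on a
--     # strictly larger stone of the set, so len(stones) rounds always suffice.
--     reach = {(0, 0)}
--     for _ in range(len(stones)):
--         new = {(s + j, j)
--                for (s, d) in reach
--                for j in (d - 1, d, d + 1)
--                if j > 0 and s + j != last and s + j in sset}
--         if new <= reach:
--             break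
--         reach |= new
--
--     return any(s + j == last
--                for (s, d) in reach
--                for j in (d - 1, d, d + 1) if j > 0)
-- ===== Notes on version B (the rewrite author's own statement) =====
-- stated objective: alternative
-- what changed: A's unmemoized DFS over (stone, jump) states (worst-case exponential re-exploration) is replaced by round-based saturation of the reachable-state set: at most len(stones) rounds each add the one-jump successors of the current set, so no state is ever expanded more than a bounded number of times.
import Mathlib
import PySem

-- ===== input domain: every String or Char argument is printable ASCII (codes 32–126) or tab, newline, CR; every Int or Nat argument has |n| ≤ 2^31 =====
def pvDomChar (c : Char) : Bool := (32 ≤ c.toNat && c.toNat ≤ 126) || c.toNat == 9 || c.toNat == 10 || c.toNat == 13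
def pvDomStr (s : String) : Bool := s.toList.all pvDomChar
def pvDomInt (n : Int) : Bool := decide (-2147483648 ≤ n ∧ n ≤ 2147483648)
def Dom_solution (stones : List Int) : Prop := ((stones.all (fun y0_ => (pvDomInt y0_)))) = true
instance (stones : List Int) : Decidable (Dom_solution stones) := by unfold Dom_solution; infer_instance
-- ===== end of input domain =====

-- B replaces A's unmemoized DFS over (stone, jump) states by a saturation of the
-- reachable-state set in at most len(stones) rounds (alternative algorithm; polynomial
-- states instead of re-exploring repeated states).


-- ===== PORT A =====

-- rank of a state: how many distinct stones lie strictly beyond it (termination measure only)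
def pvRank (S : List Int) (p : Int × Int) : Nat :=
  (S.filter (fun x => decide (p.1 < x))).length

def pvMeasure (S : List Int) (stack : List (Int × Int)) : Nat :=
  (stack.map (fun q => 4 ^ pvRank S q)).sum

-- every pushed child lands on a strictly larger member of S, so its rank drops
theorem pvRank_lt (S : List Int) (a b : Int × Int) (hb : b.1 ∈ S) (hab : a.1 < b.1) :
    pvRank S b < pvRank S a := by
  unfold pvRank
  obtain ⟨s1, s2, rfl⟩ := List.append_of_mem hb
  simp only [List.filter_append, List.length_append, List.filter_cons]
  have h1 : (s1.filter (fun x => decide (b.1 < x))).length ≤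
      (s1.filter (fun x => decide (a.1 < x))).length := by
    apply List.Sublist.length_le
    exact List.monotone_filter_right s1 (by intro x hx; simp_all; omega)
  have h2 : (s2.filter (fun x => decide (b.1 < x))).length ≤
      (s2.filter (fun x => decide (a.1 < x))).length := by
    apply List.Sublist.length_le
    exact List.monotone_filter_right s2 (by intro x hx; simp_all; omega)
  simp [hab]
  omega

theorem pvMeasure_lt (S : List Int) (p : Int × Int) (children rest : List (Int × Int))
    (hlen : children.length ≤ 3)
    (hchild : ∀ c ∈ children, pvRank S c < pvRank S p) :
    pvMeasure S (children.reverse ++ rest) < pvMeasure S (p :: rest) := by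
  simp only [pvMeasure, List.map_append, List.sum_append, List.map_cons, List.sum_cons,
    List.map_reverse, List.sum_reverse]
  have hpos : 0 < 4 ^ pvRank S p := Nat.pow_pos (by norm_num)
  by_cases hnil : children = []
  · subst hnil
    simp [hpos]
  · obtain ⟨c0, hc0⟩ := List.exists_mem_of_ne_nil _ hnil
    have hr1 : 1 ≤ pvRank S p := by
      have := hchild c0 hc0
      omega
    have hbound : ∀ t ∈ children.map (fun q => 4 ^ pvRank S q),
        t ≤ 4 ^ (pvRank S p - 1) := by
      intro t ht
      simp only [List.mem_map] at ht
      obtain ⟨c, hc, rfl⟩ := ht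
      exact Nat.pow_le_pow_right (by norm_num) (by have := hchild c hc; omega)
    have hsum := List.sum_le_card_nsmul _ _ hbound
    simp only [List.length_map, smul_eq_mul] at hsum
    have h3 : (children.map (fun q => 4 ^ pvRank S q)).sum ≤ 3 * 4 ^ (pvRank S p - 1) :=
      le_trans hsum (Nat.mul_le_mul_right _ hlen)
    have h4 : 4 ^ pvRank S p = 4 * 4 ^ (pvRank S p - 1) := by
      rw [← pow_succ']
      congr 1
      omega
    omega

-- the Python `while reachable_stones:` loop; the stack head is the top (Python pops/appends at the end)
def solutionLoopA (S : List Int) (last : Int) : List (Int × Int) → Bool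
  | [] => false
  | p :: rest =>
    let jumps := [p.2 - 1, p.2, p.2 + 1].filter (fun j => decide (0 < j))
    if jumps.any (fun j => p.1 + j == last) then true
    else
      solutionLoopA S last
        (((jumps.filter (fun j => S.contains (p.1 + j))).map (fun j => (p.1 + j, j))).reverse ++ rest)
  termination_by stack => pvMeasure S stack
  decreasing_by
    apply pvMeasure_lt
    · simp only [List.length_map]
      calc (jumps.filter (fun j => S.contains (p.1 + j))).length
          ≤ jumps.length := List.length_filter_le _ _
        _ ≤ 3 := by simpa [jumps] using List.length_filter_le _ [p.2 - 1, p.2, p.2 + 1]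
    · intro c hc
      simp only [List.mem_map, List.mem_filter] at hc
      obtain ⟨j, ⟨hjmem, hjS⟩, rfl⟩ := hc
      have hj : 0 < j := by simpa using hjmem.2
      exact pvRank_lt S p (p.1 + j, j) (by simpa [List.contains_iff_mem] using hjS) (by omega)

def solution (stones : List Int) : Bool :=
  -- for i in range(3, len(stones)): if stones[i] > stones[i-1]*2: return False
  -- (indices are in range, so pyGetD's default is never used there)
  if (PySem.List.pyRange 3 (PySem.List.len stones) 1).any
      (fun i => PySem.List.pyGetD stones i 0 > PySem.List.pyGetD stones (i - 1) 0 * 2)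
  then false
  else
    -- reading the last stone: Pre_solution excludes the empty list (IndexError in Python)
    solutionLoopA (PySem.Set.ofList stones) (PySem.List.pyGetD stones (-1) 0) [(0, 0)]

-- ===== PORT B =====

def solution_alt (stones : List Int) : Bool :=
  if (PySem.List.pyRange 3 (PySem.List.len stones) 1).any
      (fun i => PySem.List.pyGetD stones i 0 > PySem.List.pyGetD stones (i - 1) 0 * 2)
  then false
  else
    let S := PySem.Set.ofList stones
    let last := PySem.List.pyGetD stones (-1) 0    -- the last stone; Pre_solution excludes the empty list
    -- for _ in range(len(stones)): saturate; `break` at a fixpoint is ported as the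
    -- identity step (once `new <= reach` the set never changes again)
    let reach := (List.range stones.length).foldl
      (fun R _ =>
        let new := PySem.Set.ofList (R.flatMap (fun p =>
          ([p.2 - 1, p.2, p.2 + 1].filter
              (fun j => decide (0 < j) && !(p.1 + j == last) && S.contains (p.1 + j))).map
            (fun j => (p.1 + j, j))))
        if PySem.Set.issubset new R then R else PySem.Set.union R new)
      (PySem.Set.ofList [((0 : Int), (0 : Int))])
    reach.any (fun p => [p.2 - 1, p.2, p.2 + 1].any (fun j => decide (0 < j) && (p.1 + j == last)))

-- ===== PRECONDITION & SPEC =====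

-- Pre_ excludes only the empty list, on which Python A raises IndexError reading the last stone.
def Pre_solution (stones : List Int) : Prop := stones ≠ []
instance (stones : List Int) : Decidable (Pre_solution stones) := by unfold Pre_solution; infer_instance
def pvWitness_solution : List Int := [0, 1, 3, 5]

def Spec_solution (stones : List Int) (out : Bool) : Prop := out = solution_alt stones
instance (stones : List Int) (out : Bool) : Decidable (Spec_solution stones out) := by unfold Spec_solution; infer_instance

-- ===== CLAIM (what is proved, stated in full; the proofs are below) =====
def Claim_equal_solution : Prop := ∀ (stones : List Int), Dom_solution stones → Pre_solution stones → Spec_solution stones (solution stones)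

-- ===== LEMMAS AND PROOFS =====

-- the successors A pushes / B adds from a state p
def pvSuccs (S : List Int) (last : Int) (p : Int × Int) : List (Int × Int) :=
  ([p.2 - 1, p.2, p.2 + 1].filter
      (fun j => decide (0 < j) && !(p.1 + j == last) && S.contains (p.1 + j))).map
    (fun j => (p.1 + j, j))

-- a state from which the last stone is hit in one jump
def pvHit (last : Int) (p : Int × Int) : Bool :=
  [p.2 - 1, p.2, p.2 + 1].any (fun j => decide (0 < j) && (p.1 + j == last))

inductive pvReachN (S : List Int) (last : Int) : Nat → (Int × Int) → (Int × Int) → Prop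
  | refl (p) : pvReachN S last 0 p p
  | step {p c q k} : c ∈ pvSuccs S last p → pvReachN S last k c q →
      pvReachN S last (k + 1) p q

-- A's if-condition over the filtered jump list is pvHit
theorem pvHitA_eq (last : Int) (p : Int × Int) :
    (([p.2 - 1, p.2, p.2 + 1].filter (fun j => decide (0 < j))).any
      (fun j => p.1 + j == last)) = pvHit last p := by
  simp [pvHit, List.any_filter]

-- in the no-hit branch, A's pushed children are exactly pvSuccs
theorem mem_childrenA (S : List Int) (last : Int) (p c : Int × Int)
    (hnohit : pvHit last p = false) :
    (c ∈ (([p.2 - 1, p.2, p.2 + 1].filter (fun j => decide (0 < j))).filter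
        (fun j => S.contains (p.1 + j))).map (fun j => ((p.1 + j, j) : Int × Int)) ↔
      c ∈ pvSuccs S last p) := by
  simp only [pvHit, List.any_eq_false] at hnohit
  simp only [pvSuccs, List.mem_map, List.mem_filter, Bool.and_eq_true, decide_eq_true_eq,
    Bool.not_eq_true', beq_eq_false_iff_ne, ne_eq]
  constructor
  · rintro ⟨j, ⟨⟨hjl, hj⟩, hjS⟩, rfl⟩
    exact ⟨j, ⟨hjl, ⟨⟨hj, fun h => by
      have := hnohit j hjl
      simp [hj, h] at this⟩, hjS⟩⟩, rfl⟩
  · rintro ⟨j, ⟨hjl, ⟨⟨hj, _⟩, hjS⟩⟩, rfl⟩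
    exact ⟨j, ⟨⟨hjl, hj⟩, hjS⟩, rfl⟩

-- members of pvSuccs strictly decrease the rank
theorem pvRank_succs_lt (S : List Int) (last : Int) (p c : Int × Int)
    (hc : c ∈ pvSuccs S last p) : pvRank S c < pvRank S p := by
  simp only [pvSuccs, List.mem_map, List.mem_filter, Bool.and_eq_true, decide_eq_true_eq] at hc
  obtain ⟨j, ⟨_, ⟨⟨hj, _⟩, hjS⟩⟩, rfl⟩ := hc
  exact pvRank_lt S p (p.1 + j, j) (by simpa [List.contains_iff_mem] using hjS) (by omega)

-- characterization of A's worklist loop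
theorem loopA_true_iff (S : List Int) (last : Int) (stack : List (Int × Int)) :
    solutionLoopA S last stack = true ↔
      ∃ p ∈ stack, ∃ k q, pvReachN S last k p q ∧ pvHit last q = true := by
  induction stack using solutionLoopA.induct S last with
  | case1 => rw [solutionLoopA]; simp
  | case2 p rest jumps hhit =>
    constructor
    · intro _
      refine ⟨p, List.mem_cons_self, 0, p, .refl p, ?_⟩
      rw [← pvHitA_eq]
      exact hhit
    · intro _
      rw [solutionLoopA]
      simp [jumps] at hhit ⊢
      simp [hhit]
  | case3 p rest jumps hnohit ih =>
    have hnh : pvHit last p = false := by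
      rw [← pvHitA_eq]
      exact Bool.not_eq_true _ |>.mp hnohit
    rw [solutionLoopA]
    rw [if_neg hnohit, ih]
    constructor
    · rintro ⟨x, hx, k, q, hr, hq⟩
      rcases List.mem_append.mp hx with hx | hx
      · have hx' : x ∈ pvSuccs S last p :=
          (mem_childrenA S last p x hnh).mp (List.mem_reverse.mp hx)
        exact ⟨p, List.mem_cons_self, k + 1, q, .step hx' hr, hq⟩
      · exact ⟨x, List.mem_cons_of_mem _ hx, k, q, hr, hq⟩
    · rintro ⟨x, hx, k, q, hr, hq⟩
      rcases List.mem_cons.mp hx with rfl | hx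
      · cases hr with
        | refl => exact absurd hq (by simp [hnh])
        | step hc hr' =>
          refine ⟨_, List.mem_append.mpr (Or.inl (List.mem_reverse.mpr
            ((mem_childrenA S last x _ hnh).mpr hc))), _, q, hr', hq⟩
      · exact ⟨x, List.mem_append.mpr (Or.inr hx), k, q, hr, hq⟩

-- the new states B generates from R, and one saturation step (definitionally the fold body of solution_alt)
def pvNewB (S : List Int) (last : Int) (R : PySem.Set (Int × Int)) : PySem.Set (Int × Int) :=
  PySem.Set.ofList (R.flatMap (fun p =>
    ([p.2 - 1, p.2, p.2 + 1].filter
        (fun j => decide (0 < j) && !(p.1 + j == last) && S.contains (p.1 + j))).map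
      (fun j => (p.1 + j, j))))

def pvStepB (S : List Int) (last : Int) (R : PySem.Set (Int × Int)) : PySem.Set (Int × Int) :=
  if PySem.Set.issubset (pvNewB S last R) R then R else PySem.Set.union R (pvNewB S last R)

theorem mem_stepB_of_mem (S : List Int) (last : Int) (R : PySem.Set (Int × Int))
    (x : Int × Int) (hx : x ∈ R) : x ∈ pvStepB S last R := by
  unfold pvStepB
  split
  · exact hx
  · exact (PySem.Set.mem_union _ _ _).mpr (Or.inl hx)

theorem mem_stepB_of_succs (S : List Int) (last : Int) (R : PySem.Set (Int × Int))
    (p c : Int × Int) (hp : p ∈ R) (hc : c ∈ pvSuccs S last p) : c ∈ pvStepB S last R := by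
  have hnew : c ∈ pvNewB S last R := by
    rw [pvNewB, PySem.Set.mem_ofList]
    exact List.mem_flatMap.mpr ⟨p, hp, hc⟩
  unfold pvStepB
  split
  · rename_i hsub
    exact (PySem.Set.issubset_iff _ _).mp hsub c hnew
  · exact (PySem.Set.mem_union _ _ _).mpr (Or.inr hnew)

theorem mem_stepB_elim (S : List Int) (last : Int) (R : PySem.Set (Int × Int))
    (x : Int × Int) (hx : x ∈ pvStepB S last R) :
    x ∈ R ∨ ∃ p ∈ R, x ∈ pvSuccs S last p := by
  unfold pvStepB at hx
  split at hx
  · exact Or.inl hx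
  · rcases (PySem.Set.mem_union _ _ _).mp hx with h | h
    · exact Or.inl h
    · right
      rw [pvNewB, PySem.Set.mem_ofList] at h
      exact List.mem_flatMap.mp h

-- appending one step at the end of a reachability chain
theorem pvReachN_snoc (S : List Int) (last : Int) {k : Nat} {p q c : Int × Int}
    (h : pvReachN S last k p q) (hc : c ∈ pvSuccs S last q) :
    pvReachN S last (k + 1) p c := by
  induction h with
  | refl p => exact .step hc (.refl c)
  | step hm _ ih => exact .step hm (ih hc)

theorem foldB_sound (S : List Int) (last : Int) (l : List Nat) :
    ∀ R : PySem.Set (Int × Int),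
      (∀ x ∈ R, ∃ k, pvReachN S last k (0, 0) x) →
      ∀ x ∈ l.foldl (fun R _ => pvStepB S last R) R, ∃ k, pvReachN S last k (0, 0) x := by
  induction l with
  | nil => intro R hR x hx; exact hR x hx
  | cons i l ih =>
    intro R hR x hx
    refine ih (pvStepB S last R) ?_ x hx
    intro y hy
    rcases mem_stepB_elim S last R y hy with h | ⟨p, hp, hy⟩
    · exact hR y h
    · obtain ⟨k, hk⟩ := hR p hp
      exact ⟨k + 1, pvReachN_snoc S last hk hy⟩

theorem foldB_complete (S : List Int) (last : Int) (l : List Nat) :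
    ∀ (R : PySem.Set (Int × Int)) (k : Nat) (p q : Int × Int),
      pvReachN S last k p q → p ∈ R → k ≤ l.length →
      q ∈ l.foldl (fun R _ => pvStepB S last R) R := by
  induction l with
  | nil =>
    intro R k p q hr hp hk
    have hk0 : k = 0 := by simpa using hk
    subst hk0
    cases hr
    exact hp
  | cons i l ih =>
    intro R k p q hr hp hk
    cases hr with
    | refl => exact ih _ 0 p p (.refl p) (mem_stepB_of_mem S last R p hp) (by omega)
    | step hc hr => exact ih _ _ _ _ hr (mem_stepB_of_succs S last R _ _ hp hc) (by simpa using hk)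

theorem pvReachN_le_rank (S : List Int) (last : Int) {k : Nat} {p q : Int × Int}
    (h : pvReachN S last k p q) : k ≤ pvRank S p := by
  induction h with
  | refl p => omega
  | step hm _ ih =>
    have := pvRank_succs_lt S last _ _ hm
    omega

theorem pvRank_le_length (stones : List Int) (p : Int × Int) :
    pvRank (PySem.Set.ofList stones) p ≤ stones.length :=
  le_trans (List.length_filter_le _ _) (PySem.Set.length_ofList_le stones)

theorem foldB_any_iff (stones : List Int) (last : Int) :
    (((List.range stones.length).foldl
        (fun R _ => pvStepB (PySem.Set.ofList stones) last R)
        (PySem.Set.ofList [((0 : Int), (0 : Int))])).any (fun p => pvHit last p)) = true ↔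
      ∃ k q, pvReachN (PySem.Set.ofList stones) last k (0, 0) q ∧ pvHit last q = true := by
  rw [List.any_eq_true]
  constructor
  · rintro ⟨q, hq, hhit⟩
    obtain ⟨k, hk⟩ := foldB_sound (PySem.Set.ofList stones) last (List.range stones.length) _
      (by
        intro x hx
        rw [PySem.Set.mem_ofList, List.mem_singleton] at hx
        exact ⟨0, hx ▸ .refl _⟩) q hq
    exact ⟨k, q, hk, hhit⟩
  · rintro ⟨k, q, hr, hhit⟩
    refine ⟨q, foldB_complete (PySem.Set.ofList stones) last _ _ k (0, 0) q hr ?_ ?_, hhit⟩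
    · rw [PySem.Set.mem_ofList]
      simp
    · have h1 := pvReachN_le_rank (PySem.Set.ofList stones) last hr
      have h2 := pvRank_le_length stones (0, 0)
      simp only [List.length_range]
      omega

-- the two main computations agree (the prune-free case)
theorem main_eq (stones : List Int) :
    solutionLoopA (PySem.Set.ofList stones) (PySem.List.pyGetD stones (-1) 0) [(0, 0)] =
      ((List.range stones.length).foldl
        (fun R _ => pvStepB (PySem.Set.ofList stones) (PySem.List.pyGetD stones (-1) 0) R)
        (PySem.Set.ofList [((0 : Int), (0 : Int))])).any
        (fun p => pvHit (PySem.List.pyGetD stones (-1) 0) p) := by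
  rw [Bool.eq_iff_iff, loopA_true_iff, foldB_any_iff]
  simp

-- ===== VERDICT (by name: the statement is the Claim_ definition above) =====
theorem solution_spec : Claim_equal_solution := by
  unfold Claim_equal_solution
  intro stones _ _
  unfold Spec_solution solution solution_alt
  by_cases hpr : ((PySem.List.pyRange 3 (PySem.List.len stones) 1).any
      (fun i => PySem.List.pyGetD stones i 0 > PySem.List.pyGetD stones (i - 1) 0 * 2)) = true
  · simp only [hpr, if_pos]
  · simp only [Bool.not_eq_true] at hpr
    simp only [hpr, Bool.false_eq_true, if_neg, not_false_iff]
    exact main_eq stones
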